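-- pv_equiv track=rewrite | github.com/asmundur/gloggur | src/gloggur/search/router/hints.py | _detect_verbatim_literal
-- ===== SOURCE A (Python) =====
-- def _detect_verbatim_literal(query: str) -> str | None:
--     candidate = query.strip()
--     if not candidate or any(char.isspace() for char in candidate):
--         return None
--     if "/" not in candidate and "\\" not in candidate:
--         return None
--     if not any(char.isalnum() for char in candidate):
--         return None
--     return candidate
-- ===== SOURCE B (Python) =====
-- def _classify(char):
--     if char in "/\\":
--         return "sep"
--     if char.isspace():
--         return "space"
--     if char.isalnum():
--         return "alnum"
--     return "other"
--
--
-- def _detect_verbatim_literal(query: str) -> str | None: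
--     candidate = query.strip()
--     classes = {_classify(char) for char in candidate}
--     if {"sep", "alnum"} <= classes <= {"sep", "alnum", "other"}:
--         return candidate
--     return None
-- ===== Notes on version B (the rewrite author's own statement) =====
-- stated objective: alternative
-- what changed: B maps every character of the stripped query into one of four disjoint classes (sep/space/alnum/other), builds the set of classes present in one comprehension, and accepts iff {sep,alnum} <= classes <= {sep,alnum,other}, replacing A's three separate predicate/substring scans with a classification partition plus a subset-lattice test.
import Mathlib
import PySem

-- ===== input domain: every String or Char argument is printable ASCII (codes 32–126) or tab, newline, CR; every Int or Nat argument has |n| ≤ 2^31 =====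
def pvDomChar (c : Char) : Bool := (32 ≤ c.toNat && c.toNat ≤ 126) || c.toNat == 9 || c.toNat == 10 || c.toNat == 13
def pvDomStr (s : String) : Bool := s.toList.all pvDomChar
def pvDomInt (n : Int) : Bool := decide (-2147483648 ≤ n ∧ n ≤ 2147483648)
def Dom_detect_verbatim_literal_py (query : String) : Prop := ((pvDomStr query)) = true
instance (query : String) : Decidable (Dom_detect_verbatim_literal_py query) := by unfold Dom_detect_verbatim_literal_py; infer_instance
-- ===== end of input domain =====

-- B partitions the characters into four disjoint classes and decides by a subset test on the set of classes present, instead of A's three predicate scans; alternative decomposition, same cost.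

-- ===== PORT A =====
def detect_verbatim_literal_py (query : String) : Option String :=
  let candidate := PySem.Str.strip query
  if candidate.toList = [] ∨ candidate.toList.any PySem.Chars.isspace then none
  else if PySem.Str.isIn "/" candidate = false ∧ PySem.Str.isIn "\\" candidate = false then none
  else if ¬ (candidate.toList.any PySem.Chars.isalnum = true) then none
  else some candidate

-- ===== PORT B =====
-- Source B's _classify: each character falls in exactly one of "sep", "space", "alnum", "other"
def pvClassify (c : Char) : String :=
  if c == '/' || c == '\\' then "sep"
  else if PySem.Chars.isspace c then "space"
  else if PySem.Chars.isalnum c then "alnum"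
  else "other"

def detect_verbatim_literal_py_alt (query : String) : Option String :=
  let candidate := PySem.Str.strip query
  let classes : PySem.Set String := PySem.Set.ofList (candidate.toList.map pvClassify)
  if PySem.Set.issubset (PySem.Set.ofList ["sep", "alnum"]) classes
      && PySem.Set.issubset classes (PySem.Set.ofList ["sep", "alnum", "other"]) then
    some candidate
  else none

-- ===== PRECONDITION & SPEC =====
def Spec_detect_verbatim_literal_py (query : String) (out : Option String) : Prop := out = detect_verbatim_literal_py_alt query
instance (query : String) (out : Option String) : Decidable (Spec_detect_verbatim_literal_py query out) := by unfold Spec_detect_verbatim_literal_py; infer_instance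

-- ===== CLAIM (what is proved, stated in full; the proofs are below) =====
def Claim_equal_detect_verbatim_literal_py : Prop := ∀ (query : String), Dom_detect_verbatim_literal_py query → Spec_detect_verbatim_literal_py query (detect_verbatim_literal_py query)

-- ===== LEMMAS AND PROOFS =====
lemma pvSpaceNotAlnum (c : Char) (h : PySem.Chars.isspace c = true) :
    PySem.Chars.isalnum c = false := by
  simp only [PySem.Chars.isspace, PySem.Chars.isalnum, PySem.Chars.isalpha, PySem.Chars.isdigit,
    PySem.Chars.isupper, PySem.Chars.islower, Char.le_def, UInt32.le_iff_toNat_le,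
    Bool.or_eq_true, Bool.and_eq_true, decide_eq_true_eq, Bool.or_eq_false_iff,
    Bool.and_eq_false_iff, decide_eq_false_iff_not, not_le,
    show '0'.val.toNat = 48 from rfl, show '9'.val.toNat = 57 from rfl,
    show 'A'.val.toNat = 65 from rfl, show 'Z'.val.toNat = 90 from rfl,
    show 'a'.val.toNat = 97 from rfl, show 'z'.val.toNat = 122 from rfl] at h ⊢
  have hv : c.toNat = c.val.toNat := rfl
  rw [hv] at h
  omega

lemma pvClassify_eq_sep (c : Char) : pvClassify c = "sep" ↔ (c = '/' ∨ c = '\\') := by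
  unfold pvClassify
  split_ifs with h1 h2 h3 <;> simp_all

lemma pvClassify_eq_alnum (c : Char) :
    pvClassify c = "alnum" ↔ PySem.Chars.isalnum c = true := by
  unfold pvClassify
  split_ifs with h1 h2 h3
  · simp only [Bool.or_eq_true, beq_iff_eq] at h1
    constructor
    · intro h; exact absurd h (by decide)
    · intro h; rcases h1 with rfl | rfl <;> exact absurd h (by decide)
  · constructor
    · intro h; exact absurd h (by decide)
    · intro h; rw [pvSpaceNotAlnum c h2] at h; exact absurd h (by decide)
  · simp [h3]
  · constructor
    · intro h; exact absurd h (by decide)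
    · intro h; exact absurd h (by simp [h3])

lemma pvClassify_mem_upper (c : Char) :
    pvClassify c ∈ (["sep", "alnum", "other"] : List String) ↔ PySem.Chars.isspace c = false := by
  constructor
  · intro h
    by_contra hb
    have hs : PySem.Chars.isspace c = true := by
      cases hx : PySem.Chars.isspace c
      · exact absurd hx hb
      · rfl
    have hcl : pvClassify c = "space" := by
      unfold pvClassify
      have h1 : (c == '/' || c == '\\') = false := by
        simp only [Bool.or_eq_false_iff, beq_eq_false_iff_ne]
        constructor <;> rintro rfl <;> exact absurd hs (by decide)
      rw [h1, if_neg (by simp), if_pos hs]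
    rw [hcl] at h
    simp at h
  · intro h
    unfold pvClassify
    split_ifs with h1 h2 h3 <;> simp_all

lemma pvSingletonInfix (c : Char) (l : List Char) : [c] <:+: l ↔ c ∈ l := by
  constructor
  · intro h; exact List.singleton_sublist.mp h.sublist
  · intro h
    obtain ⟨s, t, rfl⟩ := List.append_of_mem h
    exact ⟨s, t, by simp⟩

lemma pvIsInSingleton (c : Char) (s : String) :
    PySem.Str.isIn (String.ofList [c]) s = s.toList.any (· == c) := by
  rcases h : s.toList.any (· == c) with _ | _
  · have h1 : ¬ [c] <:+: s.toList := by
      rw [pvSingletonInfix]; simp at h; intro hm; exact h _ hm rfl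
    have h2 : ¬ PySem.Str.isIn (String.ofList [c]) s = true := by
      rw [PySem.Str.isIn_iff_infix]; simpa using h1
    simpa using h2
  · have h1 : [c] <:+: s.toList := by
      rw [pvSingletonInfix]; simp at h; simpa using h
    rw [PySem.Str.isIn_iff_infix]; simpa using h1

lemma pvLowerSubset (cs : List Char) :
    PySem.Set.issubset (PySem.Set.ofList ["sep", "alnum"]) (PySem.Set.ofList (cs.map pvClassify)) =
      ((cs.any (· == '/') || cs.any (· == '\\')) && cs.any PySem.Chars.isalnum) := by
  apply Bool.eq_iff_iff.mpr
  rw [PySem.Set.issubset_iff]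
  simp only [Bool.and_eq_true, Bool.or_eq_true, List.any_eq_true, beq_iff_eq]
  constructor
  · intro h
    constructor
    · have := h "sep" (by rw [PySem.Set.mem_ofList]; simp)
      rw [PySem.Set.mem_ofList, List.mem_map] at this
      obtain ⟨c, hc, hcl⟩ := this
      rcases (pvClassify_eq_sep c).mp hcl with rfl | rfl
      · exact Or.inl ⟨'/', hc, rfl⟩
      · exact Or.inr ⟨'\\', hc, rfl⟩
    · have := h "alnum" (by rw [PySem.Set.mem_ofList]; simp)
      rw [PySem.Set.mem_ofList, List.mem_map] at this
      obtain ⟨c, hc, hcl⟩ := this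
      exact ⟨c, hc, (pvClassify_eq_alnum c).mp hcl⟩
  · rintro ⟨hsep, ⟨c2, hc2, h2⟩⟩ x hx
    rw [PySem.Set.mem_ofList] at hx
    rw [PySem.Set.mem_ofList, List.mem_map]
    simp only [List.mem_cons, List.not_mem_nil, or_false] at hx
    rcases hx with rfl | rfl
    · rcases hsep with ⟨c1, hc1, rfl⟩ | ⟨c1, hc1, rfl⟩
      · exact ⟨'/', hc1, (pvClassify_eq_sep '/').mpr (Or.inl rfl)⟩
      · exact ⟨'\\', hc1, (pvClassify_eq_sep '\\').mpr (Or.inr rfl)⟩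
    · exact ⟨c2, hc2, (pvClassify_eq_alnum c2).mpr h2⟩

lemma pvUpperSubset (cs : List Char) :
    PySem.Set.issubset (PySem.Set.ofList (cs.map pvClassify)) (PySem.Set.ofList ["sep", "alnum", "other"]) =
      !cs.any PySem.Chars.isspace := by
  apply Bool.eq_iff_iff.mpr
  rw [PySem.Set.issubset_iff]
  simp only [Bool.not_eq_true', List.any_eq_false]
  constructor
  · intro h c hc
    have := h (pvClassify c) (by rw [PySem.Set.mem_ofList]; exact List.mem_map_of_mem hc)
    rw [PySem.Set.mem_ofList] at this
    simpa using (pvClassify_mem_upper c).mp this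
  · intro h x hx
    rw [PySem.Set.mem_ofList, List.mem_map] at hx
    obtain ⟨c, hc, rfl⟩ := hx
    rw [PySem.Set.mem_ofList]
    exact (pvClassify_mem_upper c).mpr (by simpa using h c hc)

-- ===== VERDICT (by name: the statement is the Claim_ definition above) =====
theorem detect_verbatim_literal_py_spec : Claim_equal_detect_verbatim_literal_py := by
  intro query _
  unfold Spec_detect_verbatim_literal_py detect_verbatim_literal_py detect_verbatim_literal_py_alt
  have hs := pvIsInSingleton '/' (PySem.Str.strip query)
  have hb := pvIsInSingleton '\\' (PySem.Str.strip query)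
  have hs' : (String.ofList ['/']) = "/" := rfl
  have hb' : (String.ofList ['\\']) = "\\" := rfl
  rw [hs'] at hs; rw [hb'] at hb
  simp only [pvLowerSubset, pvUpperSubset, hs, hb]
  set cs := (PySem.Str.strip query).toList with hcs
  by_cases hnil : cs = []
  · simp [hnil]
  · by_cases h1 : cs.any PySem.Chars.isspace = true <;>
      by_cases h2 : cs.any (· == '/') = true <;>
      by_cases h3 : cs.any (· == '\\') = true <;>
      by_cases h4 : cs.any PySem.Chars.isalnum = true <;>
      simp [hnil, h1, h2, h3, h4]
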